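-- pv_equiv track=rewrite | github.com/JazonJiao/Brilliant-problems | Array9.py | genComb
-- ===== SOURCE A (Python) =====
-- def genComb(n, k):
--     assert(n >= k)
--     if k == 0:
--         return [[False] * n]
--     if k == n:
--         return [[True] * n]
--     result = []
--     front = genComb(n-1, k)
--     for i in front:
--         result += [[False] + i]
--     back = genComb(n-1, k-1)
--     for j in back:
--         result += [[True] + j]
--     return result
-- ===== SOURCE B (Python) =====
-- def genComb(n, k):
--     assert(n >= k)
--     if k == 0:
--         return [[False] * n]
--     if k == n:
--         return [[True] * n]
--     # row[i] = all length-m boolean lists with exactly i True, ascending; grown bottom-up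
--     row = [[[]]] + [[] for _ in range(k)]
--     for _ in range(n):
--         new = [[[False] + x for x in row[0]]]
--         for i in range(1, k + 1):
--             new.append([[False] + x for x in row[i]] + [[True] + x for x in row[i - 1]])
--         row = new
--     return row[k]
-- ===== Notes on version B (the rewrite author's own statement) =====
-- stated objective: alternative
-- what changed: Replaces the top-down two-branch recursion with direct answers for the trivial k==0/k==n families plus an iterative bottom-up dynamic-programming row row[i] = all length-m combinations with i Trues, grown once per bit position.
import Mathlib
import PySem

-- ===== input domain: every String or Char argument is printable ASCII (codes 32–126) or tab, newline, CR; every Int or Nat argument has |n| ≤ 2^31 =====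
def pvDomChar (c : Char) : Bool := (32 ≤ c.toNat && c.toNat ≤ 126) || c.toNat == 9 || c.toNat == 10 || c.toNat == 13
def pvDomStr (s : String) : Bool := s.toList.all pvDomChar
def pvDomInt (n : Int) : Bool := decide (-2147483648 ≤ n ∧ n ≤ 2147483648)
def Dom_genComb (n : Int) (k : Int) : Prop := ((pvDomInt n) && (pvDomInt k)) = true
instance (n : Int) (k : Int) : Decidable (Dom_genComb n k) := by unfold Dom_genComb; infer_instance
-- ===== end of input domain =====

-- B replaces A's top-down two-branch recursion by an iterative bottom-up DP row
-- (row[i] = all length-m combinations with exactly i Trues); alternative algorithm,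
-- not claimed faster.

-- ===== PORT A =====
-- A's recursion is not structurally decreasing over Int, so it is run on a fuel
-- counter (none = exception / fuel exhausted); genComb supplies fuel n.toNat + 1,
-- which is proved sufficient on Pre_ (lemma genCombA_eq below).
def genCombA : Nat → Int → Int → Option (List (List Bool))
  | 0, _, _ => none
  | f + 1, n, k =>
    if n < k then none                                   -- assert(n >= k) raises
    else if k = 0 then some [List.replicate n.toNat false]   -- [[False] * n]
    else if k = n then some [List.replicate n.toNat true]    -- [[True] * n]
    else
      match genCombA f (n - 1) k, genCombA f (n - 1) (k - 1) with
      | some front, some back =>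
          some (front.map (fun i => false :: i) ++ back.map (fun j => true :: j))
      | _, _ => none

def genComb (n : Int) (k : Int) : List (List Bool) :=
  (genCombA (n.toNat + 1) n k).getD []

-- ===== PORT B =====
-- one pass of Source B's inner loop: new = [[False]+x for x in row[0]], then for
-- i in range(1, k+1): new.append([[False]+x for x in row[i]] + [[True]+x for x in row[i-1]]).
-- row[i] is row.getD i [] (row always has length k+1 on Pre_, so the default never fires there).
def bstep (k : Nat) (row : List (List (List Bool))) : List (List (List Bool)) :=
  (List.range' 1 k).foldl
    (fun new i =>
      new ++ [(row.getD i []).map (fun x => false :: x) ++ (row.getD (i - 1) []).map (fun x => true :: x)])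
    [(row.getD 0 []).map (fun x => false :: x)]

-- trivial families answered directly; else row = [[[]]] + [[] for _ in range(k)];
-- for _ in range(n): row = bstep; return row[k]
-- (n, k Nat-ified where used as counts; exact on Pre_, where counts are nonnegative or n = k)
def genComb_alt (n : Int) (k : Int) : List (List Bool) :=
  if k = 0 then [List.replicate n.toNat false]
  else if k = n then [List.replicate n.toNat true]
  else
    ((List.range n.toNat).foldl (fun row _ => bstep k.toNat row)
        ([[([] : List Bool)]] ++ List.replicate k.toNat [])).getD k.toNat []

-- ===== PRECONDITION & SPEC =====
-- Pre_ excludes exactly the inputs where A raises: n < k (AssertionError from the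
-- assert, in both programs) and k < 0 with k ≠ n (unbounded recursion, RecursionError).
def Pre_genComb (n : Int) (k : Int) : Prop := (0 ≤ k ∧ k ≤ n) ∨ n = k
instance (n : Int) (k : Int) : Decidable (Pre_genComb n k) := by unfold Pre_genComb; infer_instance
def pvWitness_genComb : Int × Int := (4, 2)

def Spec_genComb (n : Int) (k : Int) (out : List (List Bool)) : Prop := out = genComb_alt n k
instance (n : Int) (k : Int) (out : List (List Bool)) : Decidable (Spec_genComb n k out) := by unfold Spec_genComb; infer_instance

-- ===== CLAIM (what is proved, stated in full; the proofs are below) =====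
def Claim_equal_genComb : Prop := ∀ (n : Int) (k : Int), Dom_genComb n k → Pre_genComb n k → Spec_genComb n k (genComb n k)

-- ===== LEMMAS AND PROOFS =====

-- the mathematical family both programs compute: F m i = length-m combinations with i Trues
def F : Nat → Nat → List (List Bool)
  | 0, 0 => [[]]
  | 0, _ + 1 => []
  | m + 1, 0 => (F m 0).map (fun x => false :: x)
  | m + 1, i + 1 => (F m (i + 1)).map (fun x => false :: x) ++ (F m i).map (fun x => true :: x)

theorem F_zero (m : Nat) : F m 0 = [List.replicate m false] := by
  induction m with
  | zero => rfl
  | succ m ih => rw [F, ih]; rfl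

theorem F_big (m : Nat) : ∀ i, m < i → F m i = [] := by
  induction m with
  | zero =>
      intro i hi
      obtain ⟨j, rfl⟩ : ∃ j, i = j + 1 := ⟨i - 1, by omega⟩
      rfl
  | succ m ih =>
      intro i hi
      obtain ⟨j, rfl⟩ : ∃ j, i = j + 1 := ⟨i - 1, by omega⟩
      rw [F, ih (j + 1) (by omega), ih j (by omega)]
      rfl

theorem F_self (m : Nat) : F m m = [List.replicate m true] := by
  induction m with
  | zero => rfl
  | succ m ih => rw [F, ih, F_big m (m + 1) (by omega)]; rfl

theorem getD_row_map (K : Nat) (f : Nat → List (List Bool)) (i : Nat) (hi : i < K + 1) :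
    ((List.range (K + 1)).map f).getD i [] = f i := by
  simp [List.getD, hi]

theorem foldl_push {α β : Type} (g : α → β) (l : List α) (init : List β) :
    l.foldl (fun acc x => acc ++ [g x]) init = init ++ l.map g := by
  induction l generalizing init with
  | nil => simp
  | cons a l ih => simp [List.foldl_cons, ih]

theorem bstep_map (K m : Nat) :
    bstep K ((List.range (K + 1)).map (F m)) = (List.range (K + 1)).map (F (m + 1)) := by
  unfold bstep
  rw [foldl_push]
  have hr : List.range (K + 1) = 0 :: List.range' 1 K := by
    rw [List.range_eq_range', List.range'_succ]
  conv_rhs => rw [hr]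
  simp only [List.map_cons, List.singleton_append]
  congr 1
  · rw [getD_row_map K (F m) 0 (by omega), F]
  · apply List.map_congr_left
    intro i hi
    rw [List.mem_range'] at hi
    obtain ⟨j, rfl⟩ : ∃ j, i = j + 1 := ⟨i - 1, by omega⟩
    rw [getD_row_map K (F m) (j + 1) (by omega),
      getD_row_map K (F m) (j + 1 - 1) (by omega), F]
    rfl

theorem row_invariant (K : Nat) : ∀ m : Nat,
    (List.range m).foldl (fun row _ => bstep K row) ([[([] : List Bool)]] ++ List.replicate K [])
      = (List.range (K + 1)).map (F m) := by
  have h0 : ∀ K' : Nat, (List.range (K' + 1)).map (F 0) = [[([] : List Bool)]] ++ List.replicate K' [] := by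
    intro K'
    induction K' with
    | zero => rfl
    | succ K' ih =>
        rw [List.range_succ, List.map_append, ih, List.map_singleton,
          show F 0 (K' + 1) = [] from rfl, List.replicate_succ']
        simp
  intro m
  induction m with
  | zero => simpa using (h0 K).symm
  | succ m ih =>
      rw [List.range_succ, List.foldl_append, ih, List.foldl_cons, List.foldl_nil, bstep_map]

theorem genCombA_eq (f : Nat) : ∀ (m : Nat) (k : Int), m < f → 0 ≤ k → k ≤ (m : Int) →
    genCombA f (m : Int) k = some (F m k.toNat) := by
  induction f with
  | zero => intro m k h _ _; omega
  | succ f ih =>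
      intro m k hf hk0 hkm
      rw [genCombA]
      have h1 : ¬ ((m : Int) < k) := by omega
      rw [if_neg h1]
      by_cases hk : k = 0
      · subst hk
        rw [if_pos rfl, show Int.toNat 0 = 0 from rfl, F_zero]
        simp
      · rw [if_neg hk]
        by_cases hkm' : k = (m : Int)
        · subst hkm'
          rw [if_pos rfl, Int.toNat_natCast, F_self]
        · rw [if_neg hkm']
          obtain ⟨m', rfl⟩ : ∃ m', m = m' + 1 := ⟨m - 1, by omega⟩
          have hc : ((m' + 1 : Nat) : Int) - 1 = (m' : Int) := by push_cast; ring
          rw [hc]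
          rw [ih m' k (by omega) hk0 (by push_cast at hkm' hkm ⊢; omega)]
          rw [ih m' (k - 1) (by omega) (by omega) (by push_cast at hkm ⊢; omega)]
          obtain ⟨k', hk'⟩ : ∃ k', k.toNat = k' + 1 := ⟨k.toNat - 1, by omega⟩
          have hck : (k - 1).toNat = k' := by omega
          rw [hck, hk', F]

-- ===== VERDICT (by name: the statement is the Claim_ definition above) =====
theorem genComb_spec : Claim_equal_genComb := by
  intro n k _ hpre
  show genComb n k = genComb_alt n k
  by_cases hk0 : k = 0
  · -- B's k == 0 fast path; A computes F n.toNat 0 (or, for n = k = 0, [[]] directly)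
    subst hk0
    have hn : 0 ≤ n := by rcases hpre with ⟨_, h⟩ | h <;> omega
    have hcast : ((n.toNat : Nat) : Int) = n := Int.toNat_of_nonneg hn
    have h := genCombA_eq (n.toNat + 1) n.toNat 0 (by omega) (by omega) (by omega)
    rw [hcast] at h
    unfold genComb genComb_alt
    rw [h, show Int.toNat 0 = 0 from rfl, F_zero]
    rfl
  · by_cases hkn : k = n
    · -- B's k == n fast path; both ports take their k = n branch
      subst hkn
      unfold genComb genComb_alt
      rw [genCombA]
      rw [if_neg (lt_irrefl k), if_neg hk0, if_pos rfl, if_neg hk0, if_pos rfl]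
      rfl
    · -- the DP: row after n steps is [F n 0, …, F n k]; entry k is A's value
      have hk0' : 0 ≤ k := by rcases hpre with ⟨h, _⟩ | h <;> omega
      have hkn' : k ≤ n := by rcases hpre with ⟨_, h⟩ | h <;> omega
      have hn : 0 ≤ n := le_trans hk0' hkn'
      have hcast : ((n.toNat : Nat) : Int) = n := Int.toNat_of_nonneg hn
      have h := genCombA_eq (n.toNat + 1) n.toNat k (by omega) hk0' (by omega)
      rw [hcast] at h
      unfold genComb genComb_alt
      rw [if_neg hk0, if_neg hkn, h, row_invariant k.toNat n.toNat,
        getD_row_map k.toNat (F n.toNat) k.toNat (by omega)]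
      rfl
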